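-- pv_equiv track=rewrite | github.com/alinashabaeva/math_ling | posets_generate.py | find_extreme_bounds
-- ===== SOURCE A (Python) =====
-- def find_extreme_bounds(lower_bounds, upper_bounds):
--     """
--     Finds the greatest lower bound (GLB) and least upper bound (LUB).
--     In our coordinate system:
--     - GLB is the node with the HIGHEST Y-coordinate among lower bounds
--     - LUB is the node with the LOWEST Y-coordinate among upper bounds
--     - If there are multiple nodes with the same Y-coordinate, the (upper/lower) bound does not exist.
--     """
--     # Find GLB (highest Y-coordinate among lower bounds)
--     glb = None
--     if lower_bounds:
--         max_y = max(node[0] for node in lower_bounds)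
--         highest_nodes = [node for node in lower_bounds if node[0] == max_y]
--         if len(highest_nodes) == 1:
--             glb = highest_nodes[0]
--
--     # Find LUB (lowest Y-coordinate among upper bounds)
--     lub = None
--     if upper_bounds:
--         min_y = min(node[0] for node in upper_bounds)
--         lowest_nodes = [node for node in upper_bounds if node[0] == min_y]
--         if len(lowest_nodes) == 1:
--             lub = lowest_nodes[0]
--
--     return glb, lub
-- ===== SOURCE B (Python) =====
-- def find_extreme_bounds(lower_bounds, upper_bounds):
--     def extreme(nodes, want_max):
--         best = best_y = None
--         ties = 0
--         for node in nodes: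
--             y = node[0]
--             if best_y is None or (y > best_y if want_max else y < best_y):
--                 best_y, best, ties = y, node, 1
--             elif y == best_y:
--                 ties += 1
--         return best if ties == 1 else None
--     return extreme(lower_bounds, True), extreme(upper_bounds, False)
-- ===== Notes on version B (the rewrite author's own statement) =====
-- stated objective: alternative
-- what changed: Replaces each block's three sequential passes (max/min, filter, length check) with a single shared one-pass helper that threads best_y/best_node/tie_count through one loop per list.
import Mathlib
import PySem

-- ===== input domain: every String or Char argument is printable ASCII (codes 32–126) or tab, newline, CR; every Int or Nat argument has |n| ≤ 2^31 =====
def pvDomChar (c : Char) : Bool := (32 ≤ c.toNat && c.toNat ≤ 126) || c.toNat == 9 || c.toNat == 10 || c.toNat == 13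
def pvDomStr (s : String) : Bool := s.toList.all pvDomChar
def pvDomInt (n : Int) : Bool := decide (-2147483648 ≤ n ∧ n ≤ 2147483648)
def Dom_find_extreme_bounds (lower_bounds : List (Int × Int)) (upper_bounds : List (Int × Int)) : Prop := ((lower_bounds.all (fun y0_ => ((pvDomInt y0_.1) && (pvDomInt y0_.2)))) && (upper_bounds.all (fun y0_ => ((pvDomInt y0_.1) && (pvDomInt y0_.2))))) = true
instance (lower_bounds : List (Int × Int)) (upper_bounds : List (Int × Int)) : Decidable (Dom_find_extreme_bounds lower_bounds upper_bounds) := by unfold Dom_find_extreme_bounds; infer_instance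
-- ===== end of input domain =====

-- B replaces A's three passes per list (max/min, filter, length check) by one shared
-- single-pass helper threading best_y/best_node/tie_count; same cost class, different decomposition.

-- ===== PORT A =====
def find_extreme_bounds (lower_bounds : List (Int × Int)) (upper_bounds : List (Int × Int)) : (Option (Int × Int)) × (Option (Int × Int)) :=
  -- GLB block: max over Y, then filter, then length check (as in A)
  let glb :=
    match lower_bounds with
    | [] => none
    | h :: t =>
      let max_y := t.foldl (fun a n => max a n.1) h.1
      let highest := (h :: t).filter (fun n => n.1 == max_y)
      if highest.length = 1 then highest.head? else none
  -- LUB block: min over Y, then filter, then length check (as in A)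
  let lub :=
    match upper_bounds with
    | [] => none
    | h :: t =>
      let min_y := t.foldl (fun a n => min a n.1) h.1
      let lowest := (h :: t).filter (fun n => n.1 == min_y)
      if lowest.length = 1 then lowest.head? else none
  (glb, lub)

-- ===== PORT B =====
-- one-pass accumulator: (best_y, best_node, tie_count); none = not started
def pvBetter (w : Bool) (y m : Int) : Bool := if w then m < y else y < m

def pvStep (w : Bool) (st : Option (Int × (Int × Int) × Int)) (n : Int × Int) : Option (Int × (Int × Int) × Int) :=
  match st with
  | none => some (n.1, n, 1)
  | some (m, b, c) =>
    if pvBetter w n.1 m then some (n.1, n, 1)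
    else if n.1 == m then some (m, b, c + 1)
    else some (m, b, c)

def pvExtreme (nodes : List (Int × Int)) (want_max : Bool) : Option (Int × Int) :=
  match nodes.foldl (pvStep want_max) none with
  | none => none
  | some (_, b, c) => if c == 1 then some b else none

def find_extreme_bounds_alt (lower_bounds : List (Int × Int)) (upper_bounds : List (Int × Int)) : (Option (Int × Int)) × (Option (Int × Int)) :=
  (pvExtreme lower_bounds true, pvExtreme upper_bounds false)

-- ===== PRECONDITION & SPEC =====
def Spec_find_extreme_bounds (lower_bounds : List (Int × Int)) (upper_bounds : List (Int × Int)) (out : (Option (Int × Int)) × (Option (Int × Int))) : Prop := out = find_extreme_bounds_alt lower_bounds upper_bounds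
instance (lower_bounds : List (Int × Int)) (upper_bounds : List (Int × Int)) (out : (Option (Int × Int)) × (Option (Int × Int))) : Decidable (Spec_find_extreme_bounds lower_bounds upper_bounds out) := by unfold Spec_find_extreme_bounds; infer_instance

-- ===== CLAIM (what is proved, stated in full; the proofs are below) =====
def Claim_equal_find_extreme_bounds : Prop := ∀ (lower_bounds : List (Int × Int)) (upper_bounds : List (Int × Int)), Dom_find_extreme_bounds lower_bounds upper_bounds → Spec_find_extreme_bounds lower_bounds upper_bounds (find_extreme_bounds lower_bounds upper_bounds)

-- ===== LEMMAS AND PROOFS =====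

-- the extremum B's loop tracks, written as a simple recursion
def pvE (w : Bool) (m : Int) : List (Int × Int) → Int
  | [] => m
  | n :: t => pvE w (if pvBetter w n.1 m then n.1 else m) t

-- B's fold in explicit-recursion form
def pvBestSpec (w : Bool) (m : Int) (b : Int × Int) (c : Int) : List (Int × Int) → Int × (Int × Int) × Int
  | [] => (m, b, c)
  | n :: t =>
    if pvBetter w n.1 m then pvBestSpec w n.1 n 1 t
    else if n.1 == m then pvBestSpec w m b (c + 1) t
    else pvBestSpec w m b c t

theorem foldl_pvStep (w : Bool) : ∀ (t : List (Int × Int)) (m : Int) (b : Int × Int) (c : Int),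
    t.foldl (pvStep w) (some (m, b, c)) = some (pvBestSpec w m b c t) := by
  intro t
  induction t with
  | nil => intro m b c; simp [pvBestSpec]
  | cons n t ih =>
    intro m b c
    simp only [List.foldl_cons, pvStep, pvBestSpec]
    split_ifs <;> simp_all

theorem pvBetter_ne {w : Bool} {a b : Int} (h : pvBetter w a b = true) : a ≠ b := by
  cases w <;> simp [pvBetter] at h <;> omega

theorem pvBetter_trans {w : Bool} {a b c : Int} (h1 : pvBetter w a b = true)
    (h2 : pvBetter w b c = true) : pvBetter w a c = true := by
  cases w <;> simp [pvBetter] at * <;> omega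

theorem pvE_le (w : Bool) : ∀ (t : List (Int × Int)) (m : Int),
    pvBetter w (pvE w m t) m = true ∨ pvE w m t = m := by
  intro t
  induction t with
  | nil => intro m; right; rfl
  | cons n t ih =>
    intro m
    simp only [pvE]
    by_cases h : pvBetter w n.1 m = true
    · simp only [h, if_pos]
      rcases ih n.1 with h2 | h2
      · exact Or.inl (pvBetter_trans h2 h)
      · rw [h2]; exact Or.inl h
    · simp only [h]; exact ih m

theorem pvE_mem (w : Bool) : ∀ (t : List (Int × Int)) (m : Int),
    pvE w m t = m ∨ ∃ n ∈ t, n.1 = pvE w m t := by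
  intro t
  induction t with
  | nil => intro m; left; rfl
  | cons n t ih =>
    intro m
    simp only [pvE]
    by_cases h : pvBetter w n.1 m = true
    · simp only [h, if_pos]
      rcases ih n.1 with h2 | h2
      · right; exact ⟨n, List.mem_cons_self .., by rw [h2]⟩
      · right; obtain ⟨x, hx, hx2⟩ := h2; exact ⟨x, List.mem_cons_of_mem _ hx, hx2⟩
    · simp only [h]
      rcases ih m with h2 | h2
      · left; exact h2
      · right; obtain ⟨x, hx, hx2⟩ := h2; exact ⟨x, List.mem_cons_of_mem _ hx, hx2⟩

theorem pvBetter_irrefl (w : Bool) (a : Int) : pvBetter w a a = false := by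
  cases w <;> simp [pvBetter]

theorem pvBestSpec_char (w : Bool) : ∀ (t : List (Int × Int)) (m : Int) (b : Int × Int) (c : Int),
    pvBestSpec w m b c t =
      if pvBetter w (pvE w m t) m then
        (pvE w m t, (t.filter (fun n => n.1 == pvE w m t)).headD b,
          ((t.filter (fun n => n.1 == pvE w m t)).length : Int))
      else (m, b, c + ((t.filter (fun n => n.1 == m)).length : Int)) := by
  intro t
  induction t with
  | nil =>
    intro m b c
    simp [pvBestSpec, pvE, pvBetter_irrefl]
  | cons n t ih =>
    intro m b c
    by_cases hb : pvBetter w n.1 m = true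
    · have hE : pvE w m (n :: t) = pvE w n.1 t := by simp [pvE, hb]
      rw [hE, show pvBestSpec w m b c (n :: t) = pvBestSpec w n.1 n 1 t from by
        simp [pvBestSpec, hb], ih]
      rcases pvE_le w t n.1 with ha | ha
      · have hEne : pvE w n.1 t ≠ n.1 := pvBetter_ne ha
        have hEm : pvBetter w (pvE w n.1 t) m = true := pvBetter_trans ha hb
        have hfil : (n :: t).filter (fun x => x.1 == pvE w n.1 t)
            = t.filter (fun x => x.1 == pvE w n.1 t) := by
          simp [Ne.symm hEne]
        have hne : (t.filter (fun x => x.1 == pvE w n.1 t)) ≠ [] := by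
          rcases pvE_mem w t n.1 with h2 | ⟨x, hx, hx2⟩
          · exact absurd h2.symm hEne.symm
          · intro hnil
            have := List.filter_eq_nil_iff.mp hnil x hx
            simp [hx2] at this
        rw [if_pos ha, if_pos hEm, hfil]
        rcases hl : t.filter (fun x => x.1 == pvE w n.1 t) with _ | ⟨y, ys⟩
        · exact absurd hl hne
        · rw [hl]
          simp
      · have hirr : ¬ pvBetter w (pvE w n.1 t) n.1 = true := by
          rw [ha, pvBetter_irrefl]; simp
        rw [if_neg hirr, ha, if_pos hb]
        have hfil : (n :: t).filter (fun x => x.1 == n.1)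
            = n :: t.filter (fun x => x.1 == n.1) := by simp
        rw [hfil]
        simp only [List.headD_cons, List.length_cons, Prod.mk.injEq]
        refine ⟨by simp, by simp, ?_⟩
        push_cast
        ring
    · have hb' : pvBetter w n.1 m = false := by simpa using hb
      have hE : pvE w m (n :: t) = pvE w m t := by simp [pvE, hb']
      rw [hE]
      by_cases he : n.1 = m
      · have he' : (n.1 == m) = true := by simp [he]
        rw [show pvBestSpec w m b c (n :: t) = pvBestSpec w m b (c + 1) t from by
          simp [pvBestSpec, hb', he'], ih]
        by_cases ha : pvBetter w (pvE w m t) m = true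
        · have hEne : pvE w m t ≠ m := pvBetter_ne ha
          have hfil : (n :: t).filter (fun x => x.1 == pvE w m t)
              = t.filter (fun x => x.1 == pvE w m t) := by
            simp [he, Ne.symm hEne]
          rw [if_pos ha, if_pos ha, hfil]
        · have hfil : (n :: t).filter (fun x => x.1 == m)
              = n :: t.filter (fun x => x.1 == m) := by simp [he]
          rw [if_neg ha, if_neg ha, hfil]
          simp only [List.length_cons, Prod.mk.injEq]
          refine ⟨by simp, by simp, ?_⟩
          push_cast
          ring
      · have he' : (n.1 == m) = false := by simp [he]
        rw [show pvBestSpec w m b c (n :: t) = pvBestSpec w m b c t from by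
          simp [pvBestSpec, hb', he'], ih]
        by_cases ha : pvBetter w (pvE w m t) m = true
        · have hnE : (n.1 == pvE w m t) = false := by
            simp only [beq_eq_false_iff_ne, ne_eq]
            intro h2
            exact hb (h2 ▸ ha)
          have hfil : (n :: t).filter (fun x => x.1 == pvE w m t)
              = t.filter (fun x => x.1 == pvE w m t) := by
            simp [hnE]
          rw [if_pos ha, if_pos ha, hfil]
        · have hfil : (n :: t).filter (fun x => x.1 == m)
              = t.filter (fun x => x.1 == m) := by simp [he']
          rw [if_neg ha, if_neg ha, hfil]

theorem pvExtreme_eq (w : Bool) (h : Int × Int) (t : List (Int × Int)) :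
    pvExtreme (h :: t) w =
      (let M := pvE w h.1 t
       let F := (h :: t).filter (fun n => n.1 == M)
       if F.length = 1 then F.head? else none) := by
  have hfold : List.foldl (pvStep w) none (h :: t) = some (pvBestSpec w h.1 h 1 t) := by
    rw [List.foldl_cons, show pvStep w none h = some (h.1, h, 1) from rfl, foldl_pvStep]
  simp only [pvExtreme, hfold, pvBestSpec_char]
  rcases pvE_le w t h.1 with ha | ha
  · have hEne : pvE w h.1 t ≠ h.1 := pvBetter_ne ha
    have hfil : (h :: t).filter (fun x => x.1 == pvE w h.1 t)
        = t.filter (fun x => x.1 == pvE w h.1 t) := by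
      simp [Ne.symm hEne]
    rw [if_pos ha]
    simp only [hfil]
    rcases hl : t.filter (fun x => x.1 == pvE w h.1 t) with _ | ⟨y, ys⟩
    · rw [hl]
      simp
    · rw [hl]
      rcases ys with _ | ⟨z, zs⟩
      · simp
      · have h2 : (y :: z :: zs).length ≠ 1 := by simp
        have h3 : ((y :: z :: zs).length : Int) ≠ 1 := by exact_mod_cast h2
        simp only [List.length_cons] at h2 h3 ⊢
        rw [if_neg (by simpa using h3), if_neg h2]
  · have hirr : ¬ pvBetter w (pvE w h.1 t) h.1 = true := by
      rw [ha, pvBetter_irrefl]; simp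
    rw [if_neg hirr]
    have hfil : (h :: t).filter (fun x => x.1 == h.1)
        = h :: t.filter (fun x => x.1 == h.1) := by simp
    rw [ha]
    simp only [hfil, List.length_cons]
    by_cases hc : (t.filter (fun x => x.1 == h.1)).length = 0
    · simp [hc]
    · have h3 : ¬ ((1 : Int) + ((t.filter (fun x => x.1 == h.1)).length : Int) == 1) = true := by
        simp only [beq_iff_eq]
        omega
      have h4 : (t.filter (fun x => x.1 == h.1)).length + 1 ≠ 1 := by omega
      rw [if_neg h3, if_neg h4]

theorem fold_max_eq (t : List (Int × Int)) : ∀ m : Int,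
    t.foldl (fun a n => max a n.1) m = pvE true m t := by
  induction t with
  | nil => intro m; rfl
  | cons n t ih =>
    intro m
    simp only [List.foldl_cons, pvE, pvBetter, ih]
    congr 1
    by_cases h : m < n.1
    · simp [h, max_eq_right h.le]
    · simp [h, max_eq_left (not_lt.mp h)]

theorem fold_min_eq (t : List (Int × Int)) : ∀ m : Int,
    t.foldl (fun a n => min a n.1) m = pvE false m t := by
  induction t with
  | nil => intro m; rfl
  | cons n t ih =>
    intro m
    simp only [List.foldl_cons, pvE, pvBetter, ih]
    congr 1
    by_cases h : n.1 < m
    · simp [h, min_eq_right h.le]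
    · simp [h, min_eq_left (not_lt.mp h)]

theorem pvExtreme_nil (w : Bool) : pvExtreme [] w = none := rfl

-- ===== VERDICT (by name: the statement is the Claim_ definition above) =====
theorem find_extreme_bounds_spec : Claim_equal_find_extreme_bounds := by
  intro lb ub _
  show find_extreme_bounds lb ub = find_extreme_bounds_alt lb ub
  cases lb <;> cases ub <;>
    simp only [find_extreme_bounds, find_extreme_bounds_alt, fold_max_eq, fold_min_eq,
      pvExtreme_eq, pvExtreme_nil]
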